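-- pv_equiv track=rewrite | github.com/plus-ul-tra/Bio_Computing | 9.Evolutionary _Tree/Assignment9.py | fitch_algorithm
-- ===== SOURCE A (Python) =====
-- from collections import defaultdict
--
-- def fitch_algorithm(sequences):
--     """Fitch 알고리즘을 적용하여 내부 노드에 대한 최적의 서열을 찾습니다."""
--     n = len(sequences)
--     m = len(sequences[0])
--     tree = defaultdict(list)
--
--     # 노드 초기화
--     nodes = {i: set(seq) for i, seq in enumerate(sequences)}
--     parents = {i: None for i in range(2 * n - 1)}
--
--     # 초기 트리 구성 (리프 노드만)
--     for i in range(n):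
--         tree[i] = []
--
--     current_node = n
--     while len(nodes) > 1:
--         # 두 노드를 선택
--         (a, aset), (b, bset) = sorted(nodes.items())[:2]
--         del nodes[a]
--         del nodes[b]
--
--         # 새로운 노드 생성
--         intersection = aset & bset
--         if intersection:
--             nodes[current_node] = intersection
--         else:
--             nodes[current_node] = aset | bset
--
--         tree[current_node] = [a, b]
--         parents[a] = current_node
--         parents[b] = current_node
--         current_node += 1
--
--     root = current_node - 1
--
--     # 최적 서열 결정
--     def backtrack(node):
--         if node < n:
--             return list(sequences[node])
--         left, right = tree[node]
--         left_seq = backtrack(left)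
--         right_seq = backtrack(right)
--         optimal_seq = []
--         for l, r in zip(left_seq, right_seq):
--             if l == r:
--                 optimal_seq.append(l)
--             else:
--                 optimal_seq.append(min(l, r))  # 임의의 선택
--         return optimal_seq
--
--     optimal_sequences = []
--     for node in range(2 * n - 1):
--         if node < n:
--             optimal_sequences.append(sequences[node])
--         else:
--             optimal_sequences.append(''.join(backtrack(node)))
--
--     return optimal_sequences
-- ===== SOURCE B (Python) =====
-- def fitch_algorithm(sequences):
--     """Bottom-up one pass: node n+k has children 2k and 2k+1 (A's smallest-two
--     selection always merges the two oldest live nodes, i.e. a FIFO queue over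
--     node ids 0,1,2,...), and each internal sequence is the character-wise min
--     of its two children's sequences, computed once and memoized in the result
--     list itself."""
--     n = len(sequences)
--     result = list(sequences)
--     for k in range(n - 1):
--         left, right = result[2 * k], result[2 * k + 1]
--         result.append(''.join(min(x, y) for x, y in zip(left, right)))
--     return result
-- ===== Notes on version B (the rewrite author's own statement) =====
-- stated objective: faster
-- what changed: A rebuilds the tree by repeatedly sorting a dict of live nodes and re-runs the recursive backtrack from scratch for every internal node; B exploits that A's smallest-two selection always merges the two oldest node ids (a FIFO queue), so node n+k has children 2k and 2k+1, and computes each internal sequence once in a single bottom-up pass memoized in the result list.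
import Mathlib
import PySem

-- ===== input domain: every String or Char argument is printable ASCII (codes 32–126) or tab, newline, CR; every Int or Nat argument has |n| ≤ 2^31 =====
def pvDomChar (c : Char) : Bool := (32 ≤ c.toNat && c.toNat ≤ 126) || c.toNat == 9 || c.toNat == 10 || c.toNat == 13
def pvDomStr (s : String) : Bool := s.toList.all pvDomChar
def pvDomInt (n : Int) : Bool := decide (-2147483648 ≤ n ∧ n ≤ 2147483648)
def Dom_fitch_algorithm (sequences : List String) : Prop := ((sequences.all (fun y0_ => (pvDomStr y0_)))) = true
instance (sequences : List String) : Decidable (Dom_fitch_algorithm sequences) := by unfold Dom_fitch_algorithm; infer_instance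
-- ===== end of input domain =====

-- B replaces A's repeated sort-and-merge of a node dict and its per-node recursive
-- backtracking by a single bottom-up pass with closed-form child indices (2k, 2k+1).

-- ===== PORT A =====
-- A's while-loop as fuel recursion (the guard is Python's 'len(nodes) > 1'; the fuel
-- only makes the recursion total and is never exhausted on admitted inputs).
-- 'sorted(nodes.items())' compares (int, set) tuples; dict keys are distinct ints, so
-- Python orders by the first component only — ported as sorted with key fst (exact).
def fitchMerge : Nat → Int → PySem.Dict Int (PySem.Set Char) → PySem.Dict Int (List Int) →
    PySem.Dict Int (Option Int) → Int × PySem.Dict Int (List Int)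
  | 0, cur, _, tree, _ => (cur, tree)
  | fuel + 1, cur, nodes, tree, parents =>
    if nodes.size ≤ 1 then (cur, tree)
    else
      match (PySem.List.sorted nodes.items (fun p => p.1) false).take 2 with
      | [(a, aset), (b, bset)] =>
          let nodes' := (nodes.erase a).erase b
          let inter := PySem.Set.inter aset bset
          let nodes'' := if inter ≠ [] then nodes'.insert cur inter
                         else nodes'.insert cur (PySem.Set.union aset bset)
          fitchMerge fuel (cur + 1) nodes'' (tree.insert cur [a, b])
            ((parents.insert a (some cur)).insert b (some cur))
      | _ => (cur, tree)   -- unreachable: the guard gives at least two items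

-- A's inner 'backtrack', fuel-recursive (children ids are < node, so fuel = node suffices;
-- 'left, right = tree[node]' always unpacks a 2-list on admitted inputs, other shapes
-- are unreachable).
def fitchBacktrack (sequences : List String) (n : Int) (tree : PySem.Dict Int (List Int))
    (fuel : Nat) (node : Int) : List Char :=
    if node < n then ((PySem.List.pyGet? sequences node).getD "").toList
    else
      match fuel with
      | 0 => []
      | fuel + 1 =>
        match tree.getD node [] with
        | [left, right] =>
            let left_seq := fitchBacktrack sequences n tree fuel left
            let right_seq := fitchBacktrack sequences n tree fuel right
            (left_seq.zip right_seq).foldl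
              (fun acc p => acc ++ [if p.1 = p.2 then p.1 else min p.1 p.2]) []
        | _ => []

-- m = len(sequences[0]) raises IndexError on [] (excluded by Pre_) and is otherwise unused;
-- 'root = current_node - 1' is computed by A but never used.
def fitch_algorithm (sequences : List String) : List String :=
  let n : Int := sequences.length
  let nodes0 : PySem.Dict Int (PySem.Set Char) :=
    (PySem.List.enumerate sequences).foldl
      (fun d p => d.insert p.1 (PySem.Set.ofList p.2.toList)) PySem.Dict.empty
  let parents0 : PySem.Dict Int (Option Int) :=
    (PySem.List.pyRange 0 (2 * n - 1) 1).foldl (fun d i => d.insert i none) PySem.Dict.empty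
  let tree0 : PySem.Dict Int (List Int) :=
    (PySem.List.pyRange 0 n 1).foldl (fun d i => d.insert i ([] : List Int)) PySem.Dict.empty
  let res := fitchMerge n.toNat n nodes0 tree0 parents0
  (PySem.List.pyRange 0 (2 * n - 1) 1).foldl
    (fun acc node =>
      if node < n then acc ++ [PySem.List.pyGetD sequences node ""]
      else acc ++ [String.ofList (fitchBacktrack sequences n res.2 node.toNat node)]) []

-- ===== PORT B =====
def fitch_algorithm_alt (sequences : List String) : List String :=
  let n : Int := sequences.length
  (PySem.List.pyRange 0 (n - 1) 1).foldl
    (fun result k =>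
      let left := PySem.List.pyGetD result (2 * k) ""
      let right := PySem.List.pyGetD result (2 * k + 1) ""
      result ++ [String.ofList ((left.toList.zip right.toList).map (fun p => min p.1 p.2))])
    sequences

-- ===== PRECONDITION & SPEC =====
-- Pre_ excludes only the empty list, on which A raises IndexError at len(sequences[0]).
def Pre_fitch_algorithm (sequences : List String) : Prop := sequences ≠ []
instance (sequences : List String) : Decidable (Pre_fitch_algorithm sequences) := by
  unfold Pre_fitch_algorithm; infer_instance
def pvWitness_fitch_algorithm : List String := ["AC", "GT", "AT"]

def Spec_fitch_algorithm (sequences : List String) (out : List String) : Prop :=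
  out = fitch_algorithm_alt sequences
instance (sequences : List String) (out : List String) : Decidable (Spec_fitch_algorithm sequences out) := by
  unfold Spec_fitch_algorithm; infer_instance

-- ===== CLAIM (what is proved, stated in full; the proofs are below) =====
def Claim_equal_fitch_algorithm : Prop := ∀ (sequences : List String),
  Dom_fitch_algorithm sequences → Pre_fitch_algorithm sequences →
  Spec_fitch_algorithm sequences (fitch_algorithm sequences)

-- ===== LEMMAS AND PROOFS =====

-- The common specification: node j (< n) is sequences[j]; node n + k has children
-- 2k and 2k+1 and carries the character-wise min of their sequences (zip truncates).
def pvF (s : List String) (j : Nat) : List Char :=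
  if j < s.length then (s[j]?.getD "").toList
  else if h : 2 * (j - s.length) + 1 < j then
    ((pvF s (2 * (j - s.length))).zip (pvF s (2 * (j - s.length) + 1))).map
      (fun p => min p.1 p.2)
  else []
termination_by j
decreasing_by all_goals omega

-- the common normal form both ports are reduced to
def pvOut (s : List String) : List String :=
  s ++ (List.range (s.length - 1)).map (fun u => String.ofList (pvF s (s.length + u)))

lemma pv_res_get (s : List String) (K j : Nat) (hj : j < s.length + K) :
    (((s ++ (List.range K).map (fun u => String.ofList (pvF s (s.length + u))))[j]?).getD "").toList
      = pvF s j := by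
  by_cases h : j < s.length
  · rw [List.getElem?_append_left h, pvF]
    simp [h]
  · rw [List.getElem?_append_right (Nat.le_of_not_lt h)]
    have hk : j - s.length < K := by omega
    rw [List.getElem?_map, List.getElem?_range hk]
    simp [String.toList_ofList]
    congr 1
    omega


lemma pv_alt_aux (s : List String) (K : Nat) (hK : K ≤ s.length - 1) :
    (List.range K).foldl
      (fun result (u : Nat) =>
        result ++ [String.ofList
          (((PySem.List.pyGetD result (2 * ((0:Int) + u)) "").toList.zip
            (PySem.List.pyGetD result (2 * ((0:Int) + u) + 1) "").toList).map
            (fun p => min p.1 p.2))]) s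
    = s ++ (List.range K).map (fun u => String.ofList (pvF s (s.length + u))) := by
  induction K with
  | zero => simp
  | succ k ih =>
    have hk : k ≤ s.length - 1 := by omega
    rw [List.range_succ, List.foldl_append, List.map_append, ih hk, ← List.append_assoc]
    simp only [List.foldl_cons, List.foldl_nil, List.map_cons, List.map_nil]
    congr 2
    have hlen : (s ++ (List.range k).map fun u => String.ofList (pvF s (s.length + u))).length
        = s.length + k := by simp
    have e1 : (2 * ((0:Int) + (k:Nat))) = ((2 * k : Nat) : Int) := by push_cast; ring
    have e2 : (2 * ((0:Int) + (k:Nat)) + 1) = ((2 * k + 1 : Nat) : Int) := by push_cast; ring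
    rw [e1]
    have e2' : ((2 * k : Nat) : Int) + 1 = ((2 * k + 1 : Nat) : Int) := by push_cast; ring
    rw [e2', PySem.List.pyGetD_natCast, PySem.List.pyGetD_natCast]
    have g1 : ((s ++ (List.range k).map fun u => String.ofList (pvF s (s.length + u))).getD (2*k) "").toList
        = pvF s (2 * k) := by
      rw [List.getD]; exact pv_res_get s k (2*k) (by omega)
    have g2 : ((s ++ (List.range k).map fun u => String.ofList (pvF s (s.length + u))).getD (2*k+1) "").toList
        = pvF s (2 * k + 1) := by
      rw [List.getD]; exact pv_res_get s k (2*k+1) (by omega)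
    rw [g1, g2]
    conv_rhs => rw [pvF]
    have hnl : ¬ (s.length + k < s.length) := by omega
    have hc : 2 * ((s.length + k) - s.length) + 1 < s.length + k := by omega
    rw [if_neg hnl, dif_pos hc]
    simp only [Nat.add_sub_cancel_left]

lemma pv_alt_eq (s : List String) :
    fitch_algorithm_alt s
      = s ++ (List.range (s.length - 1)).map (fun u => String.ofList (pvF s (s.length + u))) := by
  show (PySem.List.pyRange 0 ((s.length : Int) - 1) 1).foldl _ s = _
  rw [PySem.List.pyRange_one, List.foldl_map]
  have : ((s.length : Int) - 1 - 0).toNat = s.length - 1 := by omega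
  rw [this]
  exact pv_alt_aux s (s.length - 1) le_rfl

lemma pv_merge_spec (fuel : Nat) :
    ∀ (a cur : Int) (nodes : PySem.Dict Int (PySem.Set Char))
      (tree : PySem.Dict Int (List Int)) (parents : PySem.Dict Int (Option Int)),
      nodes.items.map Prod.fst = PySem.List.pyRange a cur 1 →
      a < cur → (cur - a - 1).toNat ≤ fuel →
      (fitchMerge fuel cur nodes tree parents).1 = cur + (cur - a - 1) ∧
      ∀ j : Int, (fitchMerge fuel cur nodes tree parents).2.getD j []
        = if cur ≤ j ∧ j < cur + (cur - a - 1) then [a + 2 * (j - cur), a + 2 * (j - cur) + 1]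
          else tree.getD j [] := by
  induction fuel with
  | zero =>
    intro a cur nodes tree parents hkeys hac hfuel
    have hone : cur = a + 1 := by omega
    subst hone
    simp only [fitchMerge]
    refine ⟨by omega, fun j => ?_⟩
    rw [if_neg (by omega)]
  | succ fuel ih =>
    intro a cur nodes tree parents hkeys hac hfuel
    by_cases hone : cur = a + 1
    · subst hone
      have hsize : nodes.size ≤ 1 := by
        have hl := congrArg List.length hkeys
        rw [PySem.List.pyRange_one_singleton] at hl
        simp at hl
        simp [PySem.Dict.size, hl]
      simp only [fitchMerge]
      rw [if_pos hsize]
      refine ⟨by omega, fun j => ?_⟩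
      rw [if_neg (by omega)]
    · -- at least two nodes
      have hac2 : a + 1 < cur := by omega
      have hpr : PySem.List.pyRange a cur 1
          = a :: (a + 1) :: PySem.List.pyRange (a + 2) cur 1 := by
        have h22 : a + 1 + 1 = a + 2 := by ring
        rw [PySem.List.pyRange_one_cons hac, PySem.List.pyRange_one_cons hac2, h22]
      rw [hpr] at hkeys
      rcases hit : nodes.items with _ | ⟨⟨a0, v0⟩, _ | ⟨⟨a1, v1⟩, rest⟩⟩ <;>
        rw [hit] at hkeys <;> simp at hkeys
      obtain ⟨ha0, ha1, hrestk⟩ := hkeys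
      rw [ha0, ha1] at hit
      clear ha0 ha1
      have hrest : ∀ p ∈ rest, a + 2 ≤ p.1 ∧ p.1 < cur := by
        intro p hp
        have hm : p.1 ∈ List.map Prod.fst rest := List.mem_map_of_mem hp
        rw [hrestk] at hm
        exact PySem.List.mem_pyRange_one.mp hm
      have hsize : ¬ nodes.size ≤ 1 := by
        simp [PySem.Dict.size, hit]
      have hpw : List.Pairwise (fun p q : Int × PySem.Set Char => p.1 ≤ q.1) nodes.items := by
        refine (List.pairwise_map.mp ?_).imp le_of_lt
        rw [hit]
        show List.Pairwise (· < ·) (List.map Prod.fst ((a, v0) :: (a + 1, v1) :: rest))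
        simp only [List.map_cons, hrestk]
        rw [← hpr]
        exact PySem.List.pairwise_lt_pyRange_one a cur
      have hsorted : PySem.List.sorted nodes.items (fun p => p.1) false = nodes.items :=
        PySem.List.sorted_eq_self_of_pairwise _ _ hpw
      -- the two erases remove exactly the first two items
      have hne1 : ((a + 1 : Int) == a) = false := beq_eq_false_iff_ne.mpr (by omega)
      have hf1 : ∀ p ∈ rest, (!(p.1 == a)) = true := by
        intro p hp
        have := (hrest p hp).1
        simp only [Bool.not_eq_true', beq_eq_false_iff_ne]
        omega
      have hf2 : ∀ p ∈ rest, (!(p.1 == a + 1)) = true := by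
        intro p hp
        have := (hrest p hp).1
        simp only [Bool.not_eq_true', beq_eq_false_iff_ne]
        omega
      have e1 : (nodes.erase a).items = (a + 1, v1) :: rest := by
        have h0 : (nodes.erase a).items
            = List.filter (fun p => !(p.1 == a)) nodes.items := rfl
        rw [h0, hit]
        simp [hne1, List.filter_eq_self.mpr hf1]
      have herase : ((nodes.erase a).erase (a + 1)).items = rest := by
        have h0 : ((nodes.erase a).erase (a + 1)).items
            = List.filter (fun p => !(p.1 == (a + 1))) (nodes.erase a).items := rfl
        rw [h0, e1]
        simp [List.filter_eq_self.mpr hf2]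
      have hnc : ((nodes.erase a).erase (a + 1)).contains cur = false := by
        cases hc : ((nodes.erase a).erase (a + 1)).contains cur with
        | false => rfl
        | true =>
          exfalso
          have hmem := (PySem.Dict.contains_iff_mem_keys _ _).mp hc
          have hk : ((nodes.erase a).erase (a + 1)).keys = List.map Prod.fst rest := by
            simp [PySem.Dict.keys, herase]
          rw [hk, hrestk] at hmem
          have := PySem.List.mem_pyRange_one.mp hmem
          omega
      -- reduce one step of the loop
      simp only [fitchMerge]
      rw [if_neg hsize, hsorted, hit]
      simp only [List.take_succ_cons, List.take_zero]
      have hbranch : ∀ (x y : PySem.Set Char),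
          (if PySem.Set.inter v0 v1 ≠ [] then ((nodes.erase a).erase (a + 1)).insert cur x
           else ((nodes.erase a).erase (a + 1)).insert cur y)
          = ((nodes.erase a).erase (a + 1)).insert cur
              (if PySem.Set.inter v0 v1 ≠ [] then x else y) := by
        intro x y; split <;> rfl
      rw [hbranch]
      set w := if PySem.Set.inter v0 v1 ≠ [] then PySem.Set.inter v0 v1
               else PySem.Set.union v0 v1 with hw
      have hkeys' : ((((nodes.erase a).erase (a + 1)).insert cur w).items).map Prod.fst
          = PySem.List.pyRange (a + 2) (cur + 1) 1 := by
        rw [PySem.Dict.items_insert_of_not_contains _ _ hnc, herase]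
        rw [List.map_append, hrestk]
        simp [PySem.List.pyRange_one_succ_right (by omega : a + 2 ≤ cur)]
      obtain ⟨ihc, ihg⟩ := ih (a + 2) (cur + 1) (((nodes.erase a).erase (a + 1)).insert cur w)
        (tree.insert cur [a, a + 1])
        ((parents.insert a (some cur)).insert (a + 1) (some cur))
        hkeys' (by omega) (by omega)
      refine ⟨by rw [ihc]; ring, fun j => ?_⟩
      rw [ihg j, PySem.Dict.getD_insert]
      by_cases h1 : cur + 1 ≤ j ∧ j < cur + 1 + (cur + 1 - (a + 2) - 1)
      · rw [if_pos h1, if_pos (by omega : cur ≤ j ∧ j < cur + (cur - a - 1))]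
        simp only [List.cons.injEq, and_true]
        constructor <;> ring
      · rw [if_neg h1]
        by_cases h2 : j = cur
        · rw [if_pos h2, if_pos (by omega : cur ≤ j ∧ j < cur + (cur - a - 1))]
          simp only [List.cons.injEq, and_true]
          constructor <;> omega
        · rw [if_neg h2, if_neg (by omega : ¬ (cur ≤ j ∧ j < cur + (cur - a - 1)))]

lemma pv_backtrack_eq (s : List String) (tree : PySem.Dict Int (List Int))
    (htree : ∀ j : Int, tree.getD j []
      = if (s.length : Int) ≤ j ∧ j < 2 * s.length - 1 then
          [2 * (j - s.length), 2 * (j - s.length) + 1] else [])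
    (hs : s ≠ []) :
    ∀ (fuel : Nat) (jn : Nat), jn < 2 * s.length - 1 → jn ≤ fuel →
      fitchBacktrack s (s.length : Int) tree fuel (jn : Int) = pvF s jn := by
  have leaf : ∀ (fuel : Nat) (jn : Nat), jn < s.length →
      fitchBacktrack s (s.length : Int) tree fuel (jn : Int) = pvF s jn := by
    intro fuel jn h
    rw [fitchBacktrack.eq_def]
    rw [if_pos (by exact_mod_cast h), PySem.List.pyGet?_natCast, pvF, if_pos h]
  intro fuel
  induction fuel with
  | zero =>
    intro jn h1 h2
    have h0 : jn = 0 := by omega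
    have hlen : 0 < s.length := List.length_pos_iff.mpr hs
    exact leaf 0 jn (by omega)
  | succ fuel ih =>
    intro jn h1 h2
    by_cases hj : jn < s.length
    · exact leaf (fuel + 1) jn hj
    · have hge : s.length ≤ jn := Nat.le_of_not_lt hj
      have hlen : 0 < s.length := List.length_pos_iff.mpr hs
      rw [fitchBacktrack.eq_def]
      rw [if_neg (by exact_mod_cast hj)]
      rw [htree (jn : Int),
        if_pos (by constructor <;> [exact_mod_cast hge; (push_cast; omega)])]
      have c1 : (2 * ((jn : Int) - (s.length : Int)))
          = ((2 * (jn - s.length) : Nat) : Int) := by push_cast [hge]; ring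
      have c2 : (2 * ((jn : Int) - (s.length : Int)) + 1)
          = ((2 * (jn - s.length) + 1 : Nat) : Int) := by push_cast [hge]; ring
      rw [c2, c1]
      show List.foldl (fun acc p => acc ++ [if p.1 = p.2 then p.1 else min p.1 p.2]) []
          ((fitchBacktrack s (s.length : Int) tree fuel ((2 * (jn - s.length) : Nat) : Int)).zip
            (fitchBacktrack s (s.length : Int) tree fuel ((2 * (jn - s.length) + 1 : Nat) : Int)))
          = pvF s jn
      rw [ih (2 * (jn - s.length)) (by omega) (by omega),
        ih (2 * (jn - s.length) + 1) (by omega) (by omega)]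
      rw [PySem.List.foldl_append_singleton_eq_map
        (f := fun p : Char × Char => if p.1 = p.2 then p.1 else min p.1 p.2)]
      have hmin : (fun p : Char × Char => if p.1 = p.2 then p.1 else min p.1 p.2)
          = fun p : Char × Char => min p.1 p.2 := by
        funext p
        by_cases h : p.1 = p.2
        · rw [if_pos h, h, min_self]
        · rw [if_neg h]
      rw [hmin]
      conv_rhs => rw [pvF]
      rw [if_neg hj, dif_pos (by omega)]
      rw [List.nil_append]

lemma pv_getD_foldl_insert_nil (l : List Int) :
    ∀ (d : PySem.Dict Int (List Int)), (∀ j, d.getD j [] = []) →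
      ∀ j, (l.foldl (fun d i => d.insert i ([] : List Int)) d).getD j [] = [] := by
  induction l with
  | nil => intro d h j; exact h j
  | cons x xs ih =>
    intro d h j
    rw [List.foldl_cons]
    refine ih _ (fun j' => ?_) j
    rw [PySem.Dict.getD_insert]
    split
    · rfl
    · exact h j'

lemma pv_a_eq (s : List String) (hs : s ≠ []) :
    fitch_algorithm s
      = s ++ (List.range (s.length - 1)).map (fun u => String.ofList (pvF s (s.length + u))) := by
  have hlen : 0 < s.length := List.length_pos_iff.mpr hs
  have hn1 : (1 : Int) ≤ (s.length : Int) := by exact_mod_cast hlen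
  -- the initial nodes dict has keys 0, 1, ..., n-1 in order
  have hkeys0 : (((PySem.List.enumerate s).foldl
      (fun d p => d.insert p.1 (PySem.Set.ofList p.2.toList)) PySem.Dict.empty).items).map Prod.fst
      = PySem.List.pyRange 0 (s.length : Int) 1 := by
    rw [PySem.Dict.items_foldl_insert_fresh (PySem.List.enumerate s)
      (fun p => p.1) (fun p => PySem.Set.ofList p.2.toList) PySem.Dict.empty
      (fun p _ => PySem.Dict.contains_empty _)
      (by rw [show (fun (p : Int × String) => p.1) = (fun (p : Int × String) => Prod.fst p) from rfl,
            PySem.List.map_fst_enumerate]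
          exact PySem.List.nodup_pyRange_one 0 (0 + s.length))]
    have hemp : (PySem.Dict.empty : PySem.Dict Int (PySem.Set Char)).items = [] := rfl
    rw [hemp, List.nil_append, List.map_map]
    rw [show ((fun (p : Int × PySem.Set Char) => p.1) ∘
          fun p : Int × String => (p.1, PySem.Set.ofList p.2.toList))
        = fun (p : Int × String) => Prod.fst p from rfl]
    rw [PySem.List.map_fst_enumerate]
    norm_num
  have hmerge := pv_merge_spec (s.length : Int).toNat 0 (s.length : Int)
    (((PySem.List.enumerate s).foldl
      (fun d p => d.insert p.1 (PySem.Set.ofList p.2.toList)) PySem.Dict.empty))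
    ((PySem.List.pyRange 0 (s.length : Int) 1).foldl
      (fun d i => d.insert i ([] : List Int)) PySem.Dict.empty)
    ((PySem.List.pyRange 0 (2 * (s.length : Int) - 1) 1).foldl
      (fun d i => d.insert i none) PySem.Dict.empty)
    hkeys0 (by omega) (by omega)
  set treeF := (fitchMerge (s.length : Int).toNat (s.length : Int)
    (((PySem.List.enumerate s).foldl
      (fun d p => d.insert p.1 (PySem.Set.ofList p.2.toList)) PySem.Dict.empty))
    ((PySem.List.pyRange 0 (s.length : Int) 1).foldl
      (fun d i => d.insert i ([] : List Int)) PySem.Dict.empty)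
    ((PySem.List.pyRange 0 (2 * (s.length : Int) - 1) 1).foldl
      (fun d i => d.insert i none) PySem.Dict.empty)).2 with htF
  have htree0 : ∀ j : Int, ((PySem.List.pyRange 0 (s.length : Int) 1).foldl
      (fun d i => d.insert i ([] : List Int)) PySem.Dict.empty).getD j [] = [] :=
    pv_getD_foldl_insert_nil _ _ (fun j => PySem.Dict.getD_empty _ _)
  have htreeF : ∀ j : Int, treeF.getD j []
      = if (s.length : Int) ≤ j ∧ j < 2 * s.length - 1 then
          [2 * (j - s.length), 2 * (j - s.length) + 1] else [] := by
    intro j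
    rw [htF, hmerge.2 j]
    by_cases hc : (s.length : Int) ≤ j ∧ j < (s.length : Int) + ((s.length : Int) - 0 - 1)
    · rw [if_pos hc, if_pos (by omega)]
      simp only [List.cons.injEq, and_true]
      constructor <;> ring
    · rw [if_neg hc, htree0 j, if_neg (by omega)]
  show (PySem.List.pyRange 0 (2 * (s.length : Int) - 1) 1).foldl
      (fun acc node =>
        if node < (s.length : Int) then acc ++ [PySem.List.pyGetD s node ""]
        else acc ++ [String.ofList (fitchBacktrack s (s.length : Int) treeF node.toNat node)]) []
      = _
  have hfun : (fun (acc : List String) (node : Int) =>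
        if node < (s.length : Int) then acc ++ [PySem.List.pyGetD s node ""]
        else acc ++ [String.ofList (fitchBacktrack s (s.length : Int) treeF node.toNat node)])
      = fun acc node => acc ++ [if node < (s.length : Int) then PySem.List.pyGetD s node ""
          else String.ofList (fitchBacktrack s (s.length : Int) treeF node.toNat node)] := by
    funext acc node
    split <;> rfl
  rw [hfun, PySem.List.foldl_append_singleton_eq_map, List.nil_append]
  rw [PySem.List.pyRange_one_append 0 (s.length : Int) (2 * (s.length : Int) - 1)
    (by omega) (by omega), List.map_append]
  congr 1
  · rw [List.map_congr_left (fun x hx => by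
      rw [if_pos (PySem.List.mem_pyRange_one.mp hx).2])]
    exact PySem.List.map_pyGetD_pyRange_zero' s ""
  · rw [PySem.List.pyRange_one (s.length : Int) (2 * (s.length : Int) - 1)]
    have hc : (2 * (s.length : Int) - 1 - (s.length : Int)).toNat = s.length - 1 := by omega
    rw [hc, List.map_map]
    refine List.map_congr_left (fun k hk => ?_)
    have hk' : k < s.length - 1 := List.mem_range.mp hk
    simp only [Function.comp]
    rw [if_neg (by omega)]
    have e : ((s.length : Int) + (k : Int)) = ((s.length + k : Nat) : Int) := by push_cast; ring
    rw [e]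
    simp only [Int.toNat_natCast]
    rw [pv_backtrack_eq s treeF htreeF hs (s.length + k) (s.length + k) (by omega) le_rfl]

-- ===== VERDICT (by name: the statement is the Claim_ definition above) =====
theorem fitch_algorithm_spec : Claim_equal_fitch_algorithm := by
  intro s _ hpre
  unfold Spec_fitch_algorithm
  rw [pv_a_eq s hpre, pv_alt_eq s]
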